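-- pv_equiv track=rewrite | github.com/ishaanbuildsthings/leetcode | problems/graveyard/D_Shortest_Statement_Ever.py | prevNoShare
-- ===== SOURCE A (Python) =====
-- def prevNoShare(x, y):
--     if x == 0:
--         return None
--     ub = x - 1
--
--     limit = max(ub, y).bit_length()
--     c = 0
--     smaller = False
--
--     for bit in range(limit - 1, -1, -1):
--         ubBit = (ub >> bit) & 1
--         yBit = (y >> bit) & 1
--
--         if smaller:
--             if yBit == 0:
--                 c |= 1 << bit
--             continue
--
--         if yBit == 1:
--             if ubBit == 1:
--                 smaller = True
--             continue
--
--         if ubBit == 1: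
--             c |= 1 << bit
--
--     return c
-- ===== SOURCE B (Python) =====
-- def prevNoShare(x, y):
--     if x == 0:
--         return None
--     ub = x - 1
--     # A only ever inspects the low L bits of ub and y, so reduce both mod 2**L.
--     L = max(ub, y).bit_length()
--     u = ub % (1 << L)
--     v = y % (1 << L)
--     conflict = u & v
--     if conflict == 0:
--         return u
--     b = conflict.bit_length() - 1
--     high = (u >> (b + 1)) << (b + 1)
--     low = ((1 << b) - 1) & ~v
--     return high | low
-- ===== Notes on version B (the rewrite author's own statement) =====
-- stated objective: simpler
-- what changed: A's per-bit scan with a tight/smaller flag over all bits is replaced by a closed-form computation: reduce x-1 and y modulo 2^bit_length, take the highest bit of (x-1)&y, keep the bits above it, clear it, and OR in the maximal y-free low bits.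
import Mathlib
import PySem

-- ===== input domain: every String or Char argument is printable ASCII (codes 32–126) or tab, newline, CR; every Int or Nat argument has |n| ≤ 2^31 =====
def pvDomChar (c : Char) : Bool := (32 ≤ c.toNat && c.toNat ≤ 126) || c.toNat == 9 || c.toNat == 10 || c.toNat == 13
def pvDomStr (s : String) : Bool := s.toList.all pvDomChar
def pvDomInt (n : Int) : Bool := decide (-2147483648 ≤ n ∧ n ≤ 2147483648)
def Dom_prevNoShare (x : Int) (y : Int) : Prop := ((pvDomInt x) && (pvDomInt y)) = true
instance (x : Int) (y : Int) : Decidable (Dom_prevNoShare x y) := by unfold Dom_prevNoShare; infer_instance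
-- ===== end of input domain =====

-- B replaces A's per-bit tight/smaller scan by a single highest-conflict-bit computation (mod-2^L reduction,
-- then keep the bits above the top conflict, clear it, and fill the free low bits); objective: simpler.

-- ===== PORT A =====
-- A's loop body (Python `&`,`|`,`>>`,`<<` are Int.land/lor/shiftRight/shiftLeft; the shift counts come
-- from range(limit-1,-1,-1), hence are ≥ 0, so `.toNat` on them is exact).
def prevNoShareStep (ub y : Int) (st : Int × Bool) (bit : Int) : Int × Bool :=
  let c := st.1
  let smaller := st.2
  let ubBit := Int.land (ub >>> bit.toNat) 1
  let yBit := Int.land (y >>> bit.toNat) 1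
  if smaller then
    if yBit == 0 then (Int.lor c ((1 : Int) <<< bit.toNat), smaller) else (c, smaller)
  else if yBit == 1 then
    if ubBit == 1 then (c, true) else (c, smaller)
  else if ubBit == 1 then (Int.lor c ((1 : Int) <<< bit.toNat), smaller)
  else (c, smaller)

def prevNoShare (x : Int) (y : Int) : Option Int :=
  if x == 0 then none
  else
    let ub := x - 1
    let limit := (max ub y).natAbs.size   -- Python int.bit_length()
    let st := (PySem.List.pyRange ((limit : Int) - 1) (-1) (-1)).foldl (prevNoShareStep ub y) (0, false)
    some st.1

-- ===== PORT B =====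
def prevNoShare_alt (x : Int) (y : Int) : Option Int :=
  if x == 0 then none
  else
    let ub := x - 1
    let L := (max ub y).natAbs.size       -- Python int.bit_length()
    let u := ub % ((1 : Int) <<< L)
    let v := y % ((1 : Int) <<< L)
    let conflict := Int.land u v
    if conflict == 0 then some u
    else
      let b := conflict.toNat.size - 1    -- conflict.bit_length() - 1 (conflict > 0, so toNat is exact)
      let high := (u >>> (b + 1)) <<< (b + 1)
      let low := Int.land (((1 : Int) <<< b) - 1) (Int.lnot v)
      some (Int.lor high low)

-- ===== PRECONDITION & SPEC =====
def Spec_prevNoShare (x : Int) (y : Int) (out : Option Int) : Prop := out = prevNoShare_alt x y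
instance (x : Int) (y : Int) (out : Option Int) : Decidable (Spec_prevNoShare x y out) := by unfold Spec_prevNoShare; infer_instance

-- ===== CLAIM (what is proved, stated in full; the proofs are below) =====
def Claim_equal_prevNoShare : Prop := ∀ (x : Int) (y : Int), Dom_prevNoShare x y → Spec_prevNoShare x y (prevNoShare x y)

-- ===== LEMMAS AND PROOFS =====

def pvBit (n : Int) (k : Nat) : Int := n / 2 ^ k % 2

lemma ldiff_zero_left (m : Nat) : Nat.ldiff 0 m = 0 := by simp [Nat.ldiff]

lemma ldiff_one (a : Nat) : Nat.ldiff 1 a = 1 - a % 2 := by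
  rcases Nat.even_or_odd a with ⟨b, hb⟩ | ⟨b, hb⟩
  · have h1 : (1 : Nat) = Nat.bit true 0 := by simp [Nat.bit]
    have h2 : a = Nat.bit false b := by simp [Nat.bit]; omega
    rw [h1, h2, Nat.ldiff, Nat.bitwise_bit rfl]
    simp [Nat.bit, show Nat.bitwise (fun a b => a && !b) 0 b = 0 from ldiff_zero_left b]
  · have h1 : (1 : Nat) = Nat.bit true 0 := by simp [Nat.bit]
    have h2 : a = Nat.bit true b := by simp [Nat.bit]; omega
    rw [h1, h2, Nat.ldiff, Nat.bitwise_bit rfl]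
    simp [Nat.bit, show Nat.bitwise (fun a b => a && !b) 0 b = 0 from ldiff_zero_left b]

lemma pow_cast (k : Nat) : ((2 ^ k : Nat) : Int) = 2 ^ k := by push_cast; ring

lemma bitget (n : Int) (k : Nat) : Int.land (n >>> k) 1 = pvBit n k := by
  have h := Int.shiftRight_eq_div_pow n k
  rw [pow_cast] at h
  rw [pvBit, ← h]
  generalize n >>> k = m
  cases m with
  | ofNat a =>
      show ((a &&& 1 : Nat) : Int) = _
      rw [Nat.and_one_is_mod]
      have : Int.ofNat a % 2 = ((a % 2 : Nat) : Int) := by push_cast; rfl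
      rw [this]
  | negSucc a =>
      show ((Nat.ldiff 1 a : Nat) : Int) = _
      rw [ldiff_one, Int.negSucc_eq]
      omega

lemma bit_eq_emod (n : Int) (k : Nat) : pvBit n k = n % 2 ^ (k + 1) / 2 ^ k := by
  have hp : (0:Int) < 2 ^ k := by positivity
  have hq : (0:Int) < 2 ^ (k+1) := by positivity
  have h1 : n = n % 2 ^ (k+1) + 2 ^ (k+1) * (n / 2 ^ (k+1)) := by
    have := Int.ediv_add_emod n (2 ^ (k+1)); omega
  have hr0 : 0 ≤ n % 2 ^ (k+1) := Int.emod_nonneg n (by positivity)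
  have hr1 : n % 2 ^ (k+1) < 2 ^ (k+1) := Int.emod_lt_of_pos n hq
  have h2 : n / 2 ^ k = n % 2 ^ (k+1) / 2 ^ k + 2 * (n / 2 ^ (k+1)) := by
    calc n / 2 ^ k = (n % 2 ^ (k+1) + (2 * (n / 2 ^ (k+1))) * 2 ^ k) / 2 ^ k := by
          conv_lhs => rw [h1]
          congr 1
          ring
      _ = n % 2 ^ (k+1) / 2 ^ k + 2 * (n / 2 ^ (k+1)) := Int.add_mul_ediv_right _ _ (by positivity)
  have h3 : 0 ≤ n % 2 ^ (k+1) / 2 ^ k := Int.ediv_nonneg hr0 (le_of_lt hp)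
  have h4 : n % 2 ^ (k+1) / 2 ^ k < 2 := by
    rw [Int.ediv_lt_iff_lt_mul hp]
    calc n % 2 ^ (k+1) < 2 ^ (k+1) := hr1
      _ = 2 * 2 ^ k := by ring
  rw [pvBit, h2]
  omega

lemma emod_split (n : Int) (k : Nat) : n % 2 ^ (k + 1) = n % 2 ^ k + 2 ^ k * pvBit n k := by
  have hp : (0:Int) < 2 ^ k := by positivity
  have h1 : n % 2 ^ (k+1) % 2 ^ k = n % 2 ^ k := Int.emod_emod_of_dvd n ⟨2, by ring⟩
  have h2 := Int.ediv_add_emod (n % 2 ^ (k+1)) (2 ^ k)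
  rw [bit_eq_emod]
  omega

lemma bit_emod_congr (n : Int) {j L : Nat} (h : j < L) : pvBit (n % 2 ^ L) j = pvBit n j := by
  have hd : ((2:Int) ^ (j+1)) ∣ 2 ^ L := pow_dvd_pow 2 (by omega)
  rw [bit_eq_emod, bit_eq_emod, Int.emod_emod_of_dvd n hd]

lemma lor_add (c d : Int) (t : Nat) (hc : 0 ≤ c) (hdvd : (2 ^ t : Int) ∣ c)
    (hd : 0 ≤ d) (hlt : d < 2 ^ t) : Int.lor c d = c + d := by
  obtain ⟨cn, rfl⟩ := Int.eq_ofNat_of_zero_le hc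
  obtain ⟨dn, rfl⟩ := Int.eq_ofNat_of_zero_le hd
  show ((cn ||| dn : Nat) : Int) = _
  obtain ⟨a, ha⟩ : (2 ^ t : Nat) ∣ cn := by
    rcases hdvd with ⟨e, he⟩
    have he' : (cn : Int) = (2^t : Nat) * e := by rw [he, pow_cast]
    have h0 : 0 ≤ e := by nlinarith [pow_pos (show (0:Int) < 2 by norm_num) t]
    obtain ⟨a, rfl⟩ := Int.eq_ofNat_of_zero_le h0
    refine ⟨a, ?_⟩
    have : (cn : Int) = ((2 ^ t * a : Nat) : Int) := by rw [he']; push_cast; ring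
    exact_mod_cast this
  subst ha
  have hdn : dn < 2 ^ t := by
    have : (dn : Int) < ((2 ^ t : Nat) : Int) := by rw [pow_cast]; exact hlt
    exact_mod_cast this
  rw [← Nat.two_pow_add_eq_or_of_lt hdn]
  push_cast
  ring

def bitsList (k : Nat) : List Int := (List.range k).map fun j : Nat => (k : Int) - 1 - (j : Int)

lemma pyRange_down (k : Nat) : PySem.List.pyRange ((k : Int) - 1) (-1) (-1) = bitsList k := by
  rw [PySem.List.pyRange]
  rw [if_neg (by norm_num : ¬(-1:Int) = 0), if_neg (by norm_num : ¬(0:Int) < -1)]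
  cases k with
  | zero => decide
  | succ m =>
    rw [if_pos (by push_cast; omega : (-1:Int) < ((m+1:Nat):Int) - 1)]
    have h1 : ((((m+1:Nat):Int) - 1 - (-1) + - (-1) - 1) / - (-1)).toNat = m + 1 := by
      push_cast; omega
    rw [h1]
    show List.map (fun j : Nat => ((m+1:Nat):Int) - 1 + -1 * (j:Int)) (List.range (m+1)) = bitsList (m+1)
    rw [bitsList]
    apply List.map_congr_left
    intro a _
    push_cast
    ring

lemma bitsList_succ (k : Nat) : bitsList (k + 1) = (k : Int) :: bitsList k := by
  rw [bitsList, bitsList, List.range_succ_eq_map, List.map_cons, List.map_map]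
  refine congrArg₂ _ (by push_cast; ring) ?_
  apply List.map_congr_left
  intro a _
  simp only [Function.comp]
  push_cast
  ring

lemma step_eq (ub yy c : Int) (s : Bool) (k : Nat) :
    prevNoShareStep ub yy (c, s) (k : Int) =
      if s then (if pvBit yy k = 0 then (Int.lor c (2 ^ k), true) else (c, true))
      else if pvBit yy k = 1 then (if pvBit ub k = 1 then (c, true) else (c, false))
      else if pvBit ub k = 1 then (Int.lor c (2 ^ k), false) else (c, false) := by
  cases s <;>
    simp only [prevNoShareStep, Int.toNat_natCast, bitget, Int.shiftLeft_eq, one_mul,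
      beq_iff_eq, if_true, if_false, Bool.false_eq_true]

lemma pvBit01 (n : Int) (k : Nat) : pvBit n k = 0 ∨ pvBit n k = 1 :=
  Int.emod_two_eq _

def lowS (v : Int) : Nat → Int
  | 0 => 0
  | k + 1 => lowS v k + (if pvBit v k = 0 then 2 ^ k else 0)

def GS (u v : Int) : Nat → Int × Bool
  | 0 => (0, false)
  | k + 1 =>
    if pvBit v k = 1 then
      if pvBit u k = 1 then (lowS v k, true) else GS u v k
    else
      if pvBit u k = 1 then (2 ^ k + (GS u v k).1, (GS u v k).2) else GS u v k

lemma lowS_nonneg (v : Int) (k : Nat) : 0 ≤ lowS v k := by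
  induction k with
  | zero => simp [lowS]
  | succ m ih => rw [lowS]; have : (0:Int) ≤ 2 ^ m := by positivity
                 split_ifs <;> omega

lemma lowS_lt (v : Int) (k : Nat) : lowS v k < 2 ^ k := by
  induction k with
  | zero => simp [lowS]
  | succ m ih =>
    rw [lowS]
    have h2 : (2:Int) ^ (m+1) = 2 ^ m + 2 ^ m := by ring
    have h3 : (0:Int) < 2 ^ m := by positivity
    split_ifs <;> omega

lemma lowS_eq (v : Int) (k : Nat) : lowS v k = 2 ^ k - 1 - v % 2 ^ k := by
  induction k with
  | zero => simp [lowS]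
  | succ m ih =>
    rw [lowS, ih]
    have h := emod_split v m
    have h2 : (2:Int) ^ (m+1) = 2 ^ m + 2 ^ m := by ring
    have h2 : (2:Int) ^ (m+1) = 2 ^ m + 2 ^ m := by ring
    rcases pvBit01 v m with h0 | h0 <;> rw [h0] at h <;> simp [h0] <;> omega

lemma loopS (ub yy : Int) : ∀ (k : Nat) (c : Int), 0 ≤ c → (2 ^ k : Int) ∣ c →
    (bitsList k).foldl (prevNoShareStep ub yy) (c, true) = (c + lowS yy k, true) := by
  intro k
  induction k with
  | zero => intro c _ _; simp [bitsList, lowS]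
  | succ m ih =>
    intro c hc hdvd
    rw [bitsList_succ, List.foldl_cons, step_eq, if_pos rfl]
    have hdvd' : (2 ^ m : Int) ∣ c := dvd_trans (pow_dvd_pow 2 (by omega)) hdvd
    have hlt : (2:Int) ^ m < 2 ^ (m+1) := by
      have : (2:Int) ^ (m+1) = 2 ^ m + 2 ^ m := by ring
      have h3 : (0:Int) < 2 ^ m := by positivity
      omega
    rcases pvBit01 yy m with h0 | h0
    · rw [if_pos h0]
      rw [lor_add c (2 ^ m) (m + 1) hc hdvd (by positivity) hlt]
      rw [ih (c + 2 ^ m) (by positivity) (Dvd.dvd.add hdvd' ⟨1, by ring⟩)]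
      rw [lowS, h0]
      simp
      ring
    · rw [if_neg (by omega)]
      rw [ih c hc hdvd']
      rw [lowS, h0]
      simp

lemma loopT (ub yy : Int) : ∀ (k : Nat) (c : Int), 0 ≤ c → (2 ^ k : Int) ∣ c →
    (bitsList k).foldl (prevNoShareStep ub yy) (c, false) = (c + (GS ub yy k).1, (GS ub yy k).2) := by
  intro k
  induction k with
  | zero => intro c _ _; simp [bitsList, GS]
  | succ m ih =>
    intro c hc hdvd
    rw [bitsList_succ, List.foldl_cons, step_eq, if_neg (by simp)]
    have hdvd' : (2 ^ m : Int) ∣ c := dvd_trans (pow_dvd_pow 2 (by omega)) hdvd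
    have hlt : (2:Int) ^ m < 2 ^ (m+1) := by
      have : (2:Int) ^ (m+1) = 2 ^ m + 2 ^ m := by ring
      have h3 : (0:Int) < 2 ^ m := by positivity
      omega
    rcases pvBit01 yy m with hy | hy
    · rw [if_neg (by omega)]
      rcases pvBit01 ub m with hu | hu
      · rw [if_neg (by omega), ih c hc hdvd', GS, hy, hu]
        simp
      · rw [if_pos hu]
        rw [lor_add c (2 ^ m) (m + 1) hc hdvd (by positivity) hlt]
        rw [ih (c + 2 ^ m) (by positivity) (Dvd.dvd.add hdvd' ⟨1, by ring⟩), GS, hy, hu]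
        simp
        ring_nf
        try rfl
    · rw [if_pos hy]
      rcases pvBit01 ub m with hu | hu
      · rw [if_neg (by omega), ih c hc hdvd', GS, hy, hu]
        simp
      · rw [if_pos hu]
        rw [loopS ub yy m c hc hdvd', GS, hy, hu]
        simp

lemma GS_no_conflict (u v : Int) (k : Nat)
    (h : ∀ j, j < k → ¬(pvBit u j = 1 ∧ pvBit v j = 1)) :
    GS u v k = (u % 2 ^ k, false) := by
  induction k with
  | zero => simp [GS]
  | succ m ih =>
    have hm := emod_split u m
    have ih' := ih (fun j hj => h j (by omega))
    rw [GS]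
    rcases pvBit01 v m with hv | hv
    · rw [if_neg (by omega)]
      rcases pvBit01 u m with hu | hu
      · rw [if_neg (by omega), ih']
        rw [hu] at hm
        simp only [Prod.mk.injEq]
        exact ⟨by omega, trivial⟩
      · rw [if_pos hu, ih']
        rw [hu] at hm
        simp only [Prod.mk.injEq]
        exact ⟨by omega, trivial⟩
    · rw [if_pos hv]
      have hu : pvBit u m = 0 := by
        rcases pvBit01 u m with hu | hu
        · exact hu
        · exact absurd ⟨hu, hv⟩ (h m (by omega))
      rw [if_neg (by omega), ih']
      rw [hu] at hm
      simp only [Prod.mk.injEq]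
      exact ⟨by omega, trivial⟩

lemma GS_conflict (u v : Int) : ∀ (k b : Nat), b < k →
    pvBit u b = 1 → pvBit v b = 1 →
    (∀ j, b < j → j < k → ¬(pvBit u j = 1 ∧ pvBit v j = 1)) →
    GS u v k = (u % 2 ^ k - u % 2 ^ (b + 1) + lowS v b, true) := by
  intro k
  induction k with
  | zero => omega
  | succ m ih =>
    intro b hbk hub hvb h
    have hm := emod_split u m
    rw [GS]
    rcases Nat.lt_or_ge b m with hbm | hbm
    · have ih' := ih b hbm hub hvb (fun j h1 h2 => h j h1 (by omega))
      rcases pvBit01 v m with hv | hv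
      · rw [if_neg (by omega)]
        rcases pvBit01 u m with hu | hu
        · rw [if_neg (by omega), ih']
          rw [hu] at hm
          simp only [Prod.mk.injEq]
          exact ⟨by omega, trivial⟩
        · rw [if_pos hu, ih']
          rw [hu] at hm
          simp only [Prod.mk.injEq]
          exact ⟨by omega, trivial⟩
      · rw [if_pos hv]
        have hu : pvBit u m = 0 := by
          rcases pvBit01 u m with hu | hu
          · exact hu
          · exact absurd ⟨hu, hv⟩ (h m (by omega) (by omega))
        rw [if_neg (by omega), ih']
        rw [hu] at hm
        simp only [Prod.mk.injEq]
        exact ⟨by omega, trivial⟩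
    · have hbm' : b = m := by omega
      subst hbm'
      rw [if_pos hvb, if_pos hub]
      rw [hub] at hm
      simp only [Prod.mk.injEq]
      exact ⟨by omega, trivial⟩

lemma pvBit_natCast (m : Nat) (j : Nat) : pvBit (m : Int) j = if m.testBit j then 1 else 0 := by
  rw [pvBit, Nat.testBit_eq_decide_div_mod_eq]
  have h1 : (m : Int) / 2 ^ j = ((m / 2 ^ j : Nat) : Int) := by
    push_cast; rfl
  rw [h1]
  have h2 : ((m / 2 ^ j : Nat) : Int) % 2 = ((m / 2 ^ j % 2 : Nat) : Int) := by push_cast; rfl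
  rw [h2]
  rcases Nat.mod_two_eq_zero_or_one (m / 2 ^ j) with h | h <;> rw [h] <;> simp

lemma nat_ldiff_mask (b : Nat) : ∀ m : Nat, Nat.ldiff (2 ^ b - 1) m = 2 ^ b - 1 - m % 2 ^ b := by
  induction b with
  | zero => intro m; simpa using ldiff_zero_left m
  | succ t ih =>
    intro m
    have h1 : (2 ^ (t+1) - 1 : Nat) = Nat.bit true (2 ^ t - 1) := by
      simp [Nat.bit]
      have : 0 < 2 ^ t := Nat.two_pow_pos t
      omega
    have h2 : m = Nat.bit (decide (m % 2 = 1)) (m / 2) := by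
      rcases Nat.mod_two_eq_zero_or_one m with h | h <;> simp [Nat.bit, h] <;> omega
    conv_lhs => rw [h1, h2]
    rw [Nat.ldiff, Nat.bitwise_bit rfl]
    show Nat.bit _ (Nat.ldiff (2 ^ t - 1) (m / 2)) = _
    rw [ih (m / 2)]
    have h3 : m % 2 ^ (t+1) = m % 2 + 2 * (m / 2 % 2 ^ t) := by
      have : (2:Nat) ^ (t+1) = 2 * 2 ^ t := by ring
      rw [this, Nat.mod_mul]
    have h4 : 0 < 2 ^ t := Nat.two_pow_pos t
    have h5 : m / 2 % 2 ^ t < 2 ^ t := Nat.mod_lt _ h4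
    have h6 : (2:Nat) ^ (t+1) = 2 * 2 ^ t := by ring
    rcases Nat.mod_two_eq_zero_or_one m with h | h <;> simp [Nat.bit, h] <;> omega

lemma land_natCast (a b : Nat) : Int.land (a : Int) (b : Int) = ((a &&& b : Nat) : Int) := rfl
lemma land_negSucc (a b : Nat) : Int.land (a : Int) (Int.negSucc b) = ((Nat.ldiff a b : Nat) : Int) := rfl
lemma lnot_natCast (a : Nat) : Int.lnot (a : Int) = Int.negSucc a := rfl

lemma prevNoShare_A_eq (x y : Int) (hx : ¬ x = 0) :
    prevNoShare x y = some (GS (x - 1) y ((max (x - 1) y).natAbs.size)).1 := by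
  rw [prevNoShare, if_neg (by simpa using hx)]
  simp only []
  rw [pyRange_down, loopT (x-1) y _ 0 (le_refl 0) (dvd_zero _), zero_add]

lemma central (UB Y : Int) (L : Nat) :
    some (GS UB Y L).1 =
      (let u := UB % ((1 : Int) <<< L)
       let v := Y % ((1 : Int) <<< L)
       let conflict := Int.land u v
       if conflict == 0 then some u
       else
         let b := conflict.toNat.size - 1
         let high := (u >>> (b + 1)) <<< (b + 1)
         let low := Int.land (((1 : Int) <<< b) - 1) (Int.lnot v)
         some (Int.lor high low)) := by
  have hM : ((1 : Int) <<< L) = 2 ^ L := by rw [Int.shiftLeft_eq, one_mul]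
  have hMpos : (0 : Int) < 2 ^ L := by positivity
  simp only [hM, beq_iff_eq]
  set u := UB % (2 ^ L : Int) with hudef
  set v := Y % (2 ^ L : Int) with hvdef
  have hu0 : 0 ≤ u := Int.emod_nonneg _ (by positivity)
  have hv0 : 0 ≤ v := Int.emod_nonneg _ (by positivity)
  have huL : u < 2 ^ L := Int.emod_lt_of_pos _ hMpos
  have hvL : v < 2 ^ L := Int.emod_lt_of_pos _ hMpos
  obtain ⟨un, hun⟩ := Int.eq_ofNat_of_zero_le hu0
  obtain ⟨vn, hvn⟩ := Int.eq_ofNat_of_zero_le hv0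
  have hunL : un < 2 ^ L := by
    have : (un : Int) < ((2 ^ L : Nat) : Int) := by rw [pow_cast, ← hun]; exact huL
    exact_mod_cast this
  have htu : ∀ j, pvBit u j = if un.testBit j then 1 else 0 := by
    intro j; rw [hun, pvBit_natCast]
  have htv : ∀ j, pvBit v j = if vn.testBit j then 1 else 0 := by
    intro j; rw [hvn, pvBit_natCast]
  have hcu : ∀ j, j < L → pvBit UB j = pvBit u j := by
    intro j hj; rw [hudef, bit_emod_congr UB hj]
  have hcv : ∀ j, j < L → pvBit Y j = pvBit v j := by
    intro j hj; rw [hvdef, bit_emod_congr Y hj]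
  have hland : Int.land u v = ((un &&& vn : Nat) : Int) := by rw [hun, hvn, land_natCast]
  by_cases hc : un &&& vn = 0
  · rw [if_pos (by rw [hland, hc]; rfl)]
    have hnc : ∀ j, j < L → ¬(pvBit UB j = 1 ∧ pvBit Y j = 1) := by
      intro j hj ⟨h1, h2⟩
      rw [hcu j hj, htu j] at h1
      rw [hcv j hj, htv j] at h2
      have e1 : un.testBit j = true := by by_contra hb; simp [hb] at h1
      have e2 : vn.testBit j = true := by by_contra hb; simp [hb] at h2
      have : (un &&& vn).testBit j = true := by rw [Nat.testBit_and, e1, e2]; rfl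
      rw [hc, Nat.zero_testBit] at this
      exact Bool.false_ne_true this
    rw [GS_no_conflict UB Y L hnc]
  · rw [if_neg (by rw [hland]; exact_mod_cast hc)]
    set cn := un &&& vn with hcn
    have hcnpos : 0 < cn := Nat.pos_of_ne_zero hc
    set b := cn.size - 1 with hbdef
    have hszpos : 0 < cn.size := Nat.size_pos.mpr hcnpos
    have h2b : 2 ^ b ≤ cn := Nat.lt_size.mp (by omega)
    have hlt2 : cn < 2 ^ (b + 1) := Nat.size_le.mp (by omega)
    have h2bpos : 0 < 2 ^ b := Nat.two_pow_pos b
    have htb : cn.testBit b = true := by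
      rw [Nat.testBit_eq_decide_div_mod_eq]
      have h1 : 1 ≤ cn / 2 ^ b := (Nat.le_div_iff_mul_le h2bpos).mpr (by omega)
      have h2 : cn / 2 ^ b < 2 := by
        rw [Nat.div_lt_iff_lt_mul h2bpos]
        calc cn < 2 ^ (b+1) := hlt2
          _ = 2 * 2 ^ b := by ring
      have : cn / 2 ^ b = 1 := by omega
      rw [this]
      rfl
    have hmaxj : ∀ j, b < j → cn.testBit j = false := by
      intro j hj
      exact Nat.testBit_lt_two_pow (lt_of_lt_of_le hlt2 (Nat.pow_le_pow_right (by norm_num) (by omega)))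
    have hcn_le : cn ≤ un := Nat.and_le_left
    have hbL : b < L := by
      have : cn.size ≤ L := Nat.size_le.mpr (lt_of_le_of_lt hcn_le hunL)
      omega
    have hub1 : pvBit UB b = 1 := by
      rw [hcu b hbL, htu b]
      have : un.testBit b = true := by
        have := htb
        rw [hcn, Nat.testBit_and] at this
        exact (Bool.and_eq_true_iff.mp this).1
      rw [this]; rfl
    have hvb1 : pvBit Y b = 1 := by
      rw [hcv b hbL, htv b]
      have : vn.testBit b = true := by
        have := htb
        rw [hcn, Nat.testBit_and] at this
        exact (Bool.and_eq_true_iff.mp this).2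
      rw [this]; rfl
    have hmax : ∀ j, b < j → j < L → ¬(pvBit UB j = 1 ∧ pvBit Y j = 1) := by
      intro j hbj hjL ⟨h1, h2⟩
      rw [hcu j hjL, htu j] at h1
      rw [hcv j hjL, htv j] at h2
      have e1 : un.testBit j = true := by by_contra hb; simp [hb] at h1
      have e2 : vn.testBit j = true := by by_contra hb; simp [hb] at h2
      have : cn.testBit j = true := by rw [hcn, Nat.testBit_and, e1, e2]; rfl
      rw [hmaxj j hbj] at this
      exact Bool.false_ne_true this
    rw [GS_conflict UB Y L b hbL hub1 hvb1 hmax]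
    -- identify B's b with ours
    have hbB : (Int.land u v).toNat.size - 1 = b := by
      rw [hland, Int.toNat_natCast]
    rw [hbB]
    -- high
    have hpow1 : ((2 ^ (b+1) : Nat) : Int) = 2 ^ (b+1) := pow_cast (b+1)
    have hhigh : (u >>> (b + 1)) <<< (b + 1) = u - u % 2 ^ (b + 1) := by
      rw [Int.shiftRight_eq_div_pow, hpow1, Int.shiftLeft_eq]
      have h := Int.ediv_add_emod u (2 ^ (b+1))
      linear_combination h
    -- low
    have hmask : ((1 : Int) <<< b) - 1 = ((2 ^ b - 1 : Nat) : Int) := by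
      rw [Int.shiftLeft_eq, one_mul]
      have h := Nat.one_le_two_pow (n := b)
      push_cast [h]
      ring
    have hvnmod : vn % 2 ^ b < 2 ^ b := Nat.mod_lt _ h2bpos
    have hlow : Int.land (((1 : Int) <<< b) - 1) (Int.lnot v) = lowS Y b := by
      rw [hmask, hvn, lnot_natCast, land_negSucc, nat_ldiff_mask]
      rw [lowS_eq]
      have hyb : Y % 2 ^ b = v % 2 ^ b := by
        rw [hvdef, Int.emod_emod_of_dvd Y (pow_dvd_pow 2 (by omega : b ≤ L))]
      rw [hyb, hvn]
      have : ((vn : Int)) % 2 ^ b = ((vn % 2 ^ b : Nat) : Int) := by push_cast; rfl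
      rw [this]
      have hle : vn % 2 ^ b ≤ 2 ^ b - 1 := by omega
      push_cast [Nat.cast_sub hle, Nat.cast_sub (Nat.one_le_two_pow (n := b))]
      ring
    rw [hhigh, hlow]
    -- lor is addition of disjoint parts
    have hlowS0 : 0 ≤ lowS Y b := lowS_nonneg Y b
    have hlowSlt : lowS Y b < 2 ^ (b+1) := by
      have h1 := lowS_lt Y b
      have h2 : (2:Int) ^ (b+1) = 2 ^ b + 2 ^ b := by ring
      have h3 : (0:Int) < 2 ^ b := by positivity
      omega
    have hmod0 : 0 ≤ u % 2 ^ (b+1) := Int.emod_nonneg _ (by positivity)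
    have hmodle : u % 2 ^ (b+1) ≤ u := by
      have hd := Int.emod_emod_of_dvd UB (pow_dvd_pow 2 (by omega : b+1 ≤ L))
      have h1 : u % 2 ^ (b+1) < 2 ^ (b+1) := Int.emod_lt_of_pos _ (by positivity)
      have h2 := Int.ediv_add_emod u (2 ^ (b+1))
      have h3 : 0 ≤ u / 2 ^ (b+1) := Int.ediv_nonneg hu0 (by positivity)
      nlinarith [pow_pos (show (0:Int) < 2 by norm_num) (b+1)]
    have hdvd : (2 ^ (b+1) : Int) ∣ u - u % 2 ^ (b+1) := by
      have h2 := Int.ediv_add_emod u (2 ^ (b+1))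
      exact ⟨u / 2 ^ (b+1), by omega⟩
    rw [lor_add (u - u % 2 ^ (b+1)) (lowS Y b) (b+1) (by omega) hdvd hlowS0 hlowSlt]
    -- final arithmetic
    have humod : u % 2 ^ (b+1) = UB % 2 ^ (b+1) := by
      rw [hudef, Int.emod_emod_of_dvd UB (pow_dvd_pow 2 (by omega : b+1 ≤ L))]
    rw [humod]

lemma prevNoShare_main (x y : Int) : prevNoShare x y = prevNoShare_alt x y := by
  by_cases hx : x = 0
  · rw [prevNoShare, prevNoShare_alt, if_pos (by simpa using hx), if_pos (by simpa using hx)]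
  · rw [prevNoShare_A_eq x y hx, prevNoShare_alt, if_neg (by simpa using hx)]
    exact central (x - 1) y _

-- ===== VERDICT (by name: the statement is the Claim_ definition above) =====
theorem prevNoShare_spec : Claim_equal_prevNoShare := by
  intro x y _
  show prevNoShare x y = prevNoShare_alt x y
  exact prevNoShare_main x y
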